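-- pv_equiv track=rewrite | github.com/pypi-data/pypi-mirror-252 | packages/topoly/topoly-1.0.3-cp312-cp312-manylinux2014_x86_64.whl/topoly/manipulation.py | prepareArcsFromBreaks
-- ===== SOURCE A (Python) =====
-- def prepareArcsFromBreaks(coordinates, breaks, bridges):
--     # preparing the arcs including the information in breaks and bridges
--     if not breaks:
--         breaks = []
--     if not bridges:
--         bridges = []
--     beg = min(list(coordinates.keys()))
--     end = max(list(coordinates.keys()))
--     bridging_atoms = [atom for bridge in bridges for atom in bridge]
--     arcs = []
--     arc = []
--     for k in range(beg, end + 1):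
--         if k == beg or k == end or k not in breaks + bridging_atoms:
--             arc.append(k)
--         elif k != beg and k != end and k in bridging_atoms:
--             arc.append(k)
--             arcs.append(arc)
--             arc = [k]
--         else:
--             #arc.append(k)   #WANDA: if we were here, it would mean that k was in breaks, thus we do not want add it to an arc?
--             #arcs.append(arc)
--             if arc: arcs.append(arc)
--
--             arc = []
--     arcs.append(arc)
--     arcs += [list(bridge) for bridge in bridges]
--     return arcs
-- ===== SOURCE B (Python) =====
-- def prepareArcsFromBreaks(coordinates, breaks, bridges):
--     # Carve the key range into arcs by walking the sorted interior cut points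
--     # (bridge atoms take priority over breaks), instead of scanning every integer.
--     breaks = breaks or []
--     bridges = bridges or []
--     keys = list(coordinates.keys())
--     beg, end = min(keys), max(keys)
--     bridge_set = {atom for bridge in bridges for atom in bridge}
--     cut_points = sorted(k for k in bridge_set | set(breaks) if beg < k < end)
--     arcs = []
--     start = beg
--     for p in cut_points:
--         if p in bridge_set:
--             arcs.append(list(range(start, p + 1)))
--             start = p
--         else:
--             if start < p:
--                 arcs.append(list(range(start, p)))
--             start = p + 1
--     arcs.append(list(range(start, end + 1)))
--     arcs += [list(bridge) for bridge in bridges]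
--     return arcs
-- ===== Notes on version B (the rewrite author's own statement) =====
-- stated objective: faster
-- what changed: Instead of scanning every integer in [min,max] and testing list membership against breaks+bridge atoms at each step, B sorts the interior cut points once and carves the range into contiguous arc slices by walking only those cut points.
import Mathlib
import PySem

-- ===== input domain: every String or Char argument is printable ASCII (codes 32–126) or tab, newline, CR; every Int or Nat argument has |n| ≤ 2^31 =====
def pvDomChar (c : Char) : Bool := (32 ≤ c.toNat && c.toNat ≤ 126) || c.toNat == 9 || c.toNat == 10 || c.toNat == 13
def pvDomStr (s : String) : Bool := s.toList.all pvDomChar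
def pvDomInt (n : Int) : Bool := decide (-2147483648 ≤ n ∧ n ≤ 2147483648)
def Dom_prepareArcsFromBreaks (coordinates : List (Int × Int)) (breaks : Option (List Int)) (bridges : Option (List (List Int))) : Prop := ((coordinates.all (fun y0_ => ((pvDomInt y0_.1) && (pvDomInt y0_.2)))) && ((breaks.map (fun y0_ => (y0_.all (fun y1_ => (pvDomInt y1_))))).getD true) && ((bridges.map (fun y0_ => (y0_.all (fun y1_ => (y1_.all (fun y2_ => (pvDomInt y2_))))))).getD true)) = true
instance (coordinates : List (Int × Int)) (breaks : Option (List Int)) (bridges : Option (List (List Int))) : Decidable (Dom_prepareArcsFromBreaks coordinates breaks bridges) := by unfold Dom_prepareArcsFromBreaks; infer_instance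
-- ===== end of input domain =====

-- B replaces A's scan over every integer in [beg, end] (with a list-membership test per integer)
-- by a walk over the SORTED interior cut points only, emitting each arc as a contiguous range slice.

-- ===== PORT A =====
-- loop body of A's 'for k in range(beg, end + 1)': state = (arcs, arc)
def pvStepA (beg e : Int) (bs br : List Int) (st : List (List Int) × List Int) (k : Int) : List (List Int) × List Int :=
  if k = beg ∨ k = e ∨ k ∉ bs ++ br then (st.1, st.2 ++ [k])
  else if k ≠ beg ∧ k ≠ e ∧ k ∈ br then (st.1 ++ [st.2 ++ [k]], [k])
  else ((if st.2 ≠ [] then st.1 ++ [st.2] else st.1), ([] : List Int))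

def prepareArcsFromBreaks (coordinates : List (Int × Int)) (breaks : Option (List Int)) (bridges : Option (List (List Int))) : List (List Int) :=
  let bs := breaks.getD []
  let brs := bridges.getD []
  let keys := coordinates.map Prod.fst
  match PySem.List.min? keys (fun x => x), PySem.List.max? keys (fun x => x) with
  | some beg, some e =>
    let bridgingAtoms := brs.flatMap (fun bridge => bridge)
    let res := (PySem.List.pyRange beg (e + 1) 1).foldl (pvStepA beg e bs bridgingAtoms) ([], [])
    (res.1 ++ [res.2]) ++ brs.map (fun bridge => bridge)
  | _, _ => []  -- min()/max() of an empty sequence raises ValueError; excluded by Pre_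

-- ===== PORT B =====
-- loop body of B's 'for p in cut_points': state = (arcs, start)
def pvStepB (brset : List Int) (st : List (List Int) × Int) (p : Int) : List (List Int) × Int :=
  if p ∈ brset then (st.1 ++ [PySem.List.pyRange st.2 (p + 1) 1], p)
  else ((if st.2 < p then st.1 ++ [PySem.List.pyRange st.2 p 1] else st.1), p + 1)

def prepareArcsFromBreaks_alt (coordinates : List (Int × Int)) (breaks : Option (List Int)) (bridges : Option (List (List Int))) : List (List Int) :=
  let bs := breaks.getD []
  let brs := bridges.getD []
  let keys := coordinates.map Prod.fst
  match PySem.List.min? keys (fun x => x) with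
  | none => []  -- min() of an empty sequence raises ValueError; excluded by Pre_
  | some beg =>
    match PySem.List.max? keys (fun x => x) with
    | none => []
    | some e =>
      let bridgeSet := PySem.Set.ofList (brs.flatMap (fun bridge => bridge))
      let cutPoints := PySem.List.sorted ((PySem.Set.union bridgeSet bs).filter (fun k => decide (beg < k) && decide (k < e))) (fun x => x) false
      let res := cutPoints.foldl (pvStepB bridgeSet) ([], beg)
      (res.1 ++ [PySem.List.pyRange res.2 (e + 1) 1]) ++ brs.map (fun bridge => bridge)

-- ===== PRECONDITION & SPEC =====
-- min()/max() of the key list raise ValueError on an empty dict: exclude it.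
def Pre_prepareArcsFromBreaks (coordinates : List (Int × Int)) (breaks : Option (List Int)) (bridges : Option (List (List Int))) : Prop := coordinates ≠ []
instance (coordinates : List (Int × Int)) (breaks : Option (List Int)) (bridges : Option (List (List Int))) : Decidable (Pre_prepareArcsFromBreaks coordinates breaks bridges) := by unfold Pre_prepareArcsFromBreaks; infer_instance

def pvWitness_prepareArcsFromBreaks : (List (Int × Int)) × Option (List Int) × Option (List (List Int)) := ([(0, 0), (3, 1)], some [2], some [[1]])

def Spec_prepareArcsFromBreaks (coordinates : List (Int × Int)) (breaks : Option (List Int)) (bridges : Option (List (List Int))) (out : List (List Int)) : Prop := out = prepareArcsFromBreaks_alt coordinates breaks bridges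
instance (coordinates : List (Int × Int)) (breaks : Option (List Int)) (bridges : Option (List (List Int))) (out : List (List Int)) : Decidable (Spec_prepareArcsFromBreaks coordinates breaks bridges out) := by unfold Spec_prepareArcsFromBreaks; infer_instance

-- ===== CLAIM (what is proved, stated in full; the proofs are below) =====
def Claim_equal_prepareArcsFromBreaks : Prop := ∀ (coordinates : List (Int × Int)) (breaks : Option (List Int)) (bridges : Option (List (List Int))), Dom_prepareArcsFromBreaks coordinates breaks bridges → Pre_prepareArcsFromBreaks coordinates breaks bridges → Spec_prepareArcsFromBreaks coordinates breaks bridges (prepareArcsFromBreaks coordinates breaks bridges)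

-- ===== LEMMAS AND PROOFS =====

-- A sorted, strictly increasing list whose members are exactly {k | C k ∧ s ≤ k}, with C s, starts with s.
lemma pv_cut_head (C : Int → Prop) (qs : List Int) (s : Int)
    (hp : qs.Pairwise (· < ·))
    (hmem : ∀ k, k ∈ qs ↔ C k ∧ s ≤ k) (hs : C s) :
    ∃ t, qs = s :: t ∧ t.Pairwise (· < ·) ∧ (∀ k, k ∈ t ↔ C k ∧ s + 1 ≤ k) := by
  cases qs with
  | nil =>
    exact absurd ((hmem s).2 ⟨hs, le_refl s⟩) (List.not_mem_nil)
  | cons q t =>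
    have hq : C q ∧ s ≤ q := (hmem q).1 (List.mem_cons_self)
    have hsq : s = q := by
      have hsmem : s ∈ q :: t := (hmem s).2 ⟨hs, le_refl s⟩
      rcases List.mem_cons.1 hsmem with h | h
      · exact h
      · have := (List.pairwise_cons.1 hp).1 s h
        omega
    subst hsq
    refine ⟨t, rfl, (List.pairwise_cons.1 hp).2, fun k => ?_⟩
    constructor
    · intro hk
      have h1 := (hmem k).1 (List.mem_cons_of_mem _ hk)
      have h2 := (List.pairwise_cons.1 hp).1 k hk
      exact ⟨h1.1, by omega⟩
    · intro ⟨hC, hle⟩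
      have : k ∈ s :: t := (hmem k).2 ⟨hC, by omega⟩
      rcases List.mem_cons.1 this with h | h
      · omega
      · exact h

-- Main carving invariant: A's per-integer scan from s with current arc = [start..s-1]
-- equals B's walk over the remaining cut points (those ≥ s).
lemma pv_carve (bs br brset : List Int) (beg e : Int)
    (hbrset : ∀ k, k ∈ brset ↔ k ∈ br) :
    ∀ (n : Nat) (s start : Int) (qs : List Int) (arcs : List (List Int)),
    beg < s → s ≤ e + 1 → start ≤ s → (e + 1 - s).toNat = n →
    qs.Pairwise (· < ·) →
    (∀ k, k ∈ qs ↔ (k ∈ bs ∨ k ∈ br) ∧ beg < k ∧ k < e ∧ s ≤ k) →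
    (let r := (PySem.List.pyRange s (e + 1) 1).foldl (pvStepA beg e bs br) (arcs, PySem.List.pyRange start s 1)
     r.1 ++ [r.2]) =
    (let r := qs.foldl (pvStepB brset) (arcs, start)
     r.1 ++ [PySem.List.pyRange r.2 (e + 1) 1]) := by
  intro n
  induction n with
  | zero =>
    intro s start qs arcs h1 h2 h3 h4 hp hmem
    have hse : s = e + 1 := by omega
    subst hse
    have hqs : qs = [] := by
      cases qs with
      | nil => rfl
      | cons q t =>
        have := (hmem q).1 (List.mem_cons_self)
        omega
    subst hqs
    simp [PySem.List.pyRange_one_eq_nil (le_refl (e + 1))]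
  | succ m ih =>
    intro s start qs arcs h1 h2 h3 h4 hp hmem
    have hse : s ≤ e := by omega
    rw [PySem.List.pyRange_one_cons (by omega : s < e + 1)]
    simp only [List.foldl_cons]
    by_cases hcut : s ∈ bs ∨ s ∈ br
    · by_cases hlast : s = e
      · -- s = e: A appends e to the arc; no interior cut point remains
        have hstepA : pvStepA beg e bs br (arcs, PySem.List.pyRange start s 1) s
            = (arcs, PySem.List.pyRange start (s + 1) 1) := by
          simp only [pvStepA]
          rw [if_pos (Or.inr (Or.inl hlast)), PySem.List.pyRange_one_succ_right h3]
        rw [hstepA]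
        have hqs : qs = [] := by
          cases qs with
          | nil => rfl
          | cons q t =>
            have := (hmem q).1 (List.mem_cons_self)
            omega
        subst hqs
        exact ih (s + 1) start [] arcs (by omega) (by omega) (by omega) (by omega)
          List.Pairwise.nil (by intro k; simp; omega)
      · -- beg < s < e and s is a cut point: qs starts with s
        obtain ⟨t, hq, hpt, hmt⟩ := pv_cut_head
          (fun k => (k ∈ bs ∨ k ∈ br) ∧ beg < k ∧ k < e) qs s hp
          (by intro k; rw [hmem k]; tauto) ⟨hcut, h1, by omega⟩
        subst hq
        simp only [List.foldl_cons]
        by_cases hbr : s ∈ br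
        · -- bridge atom: close arc including s, reopen at s
          have hc1 : ¬(s = beg ∨ s = e ∨ s ∉ bs ++ br) := by
            push Not
            exact ⟨by omega, hlast, List.mem_append.2 (Or.inr hbr)⟩
          have hstepA : pvStepA beg e bs br (arcs, PySem.List.pyRange start s 1) s
              = (arcs ++ [PySem.List.pyRange start (s + 1) 1], PySem.List.pyRange s (s + 1) 1) := by
            simp only [pvStepA]
            rw [if_neg hc1, if_pos ⟨by omega, hlast, hbr⟩,
              PySem.List.pyRange_one_succ_right h3, PySem.List.pyRange_one_singleton]
          have hstepB : pvStepB brset (arcs, start) s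
              = (arcs ++ [PySem.List.pyRange start (s + 1) 1], s) := by
            simp only [pvStepB]
            rw [if_pos ((hbrset s).2 hbr)]
          rw [hstepA, hstepB]
          exact ih (s + 1) s t (arcs ++ [PySem.List.pyRange start (s + 1) 1])
            (by omega) (by omega) (by omega) (by omega) hpt
            (by intro k; rw [hmt k]; tauto)
        · -- pure break: drop s, close the arc if nonempty, reopen empty
          have hbs : s ∈ bs := by tauto
          have hemp : (PySem.List.pyRange start s 1 ≠ []) ↔ start < s := by
            constructor
            · intro hne
              by_contra hlt
              exact hne (PySem.List.pyRange_one_eq_nil (by omega))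
            · intro hlt
              rw [PySem.List.pyRange_one_cons hlt]
              simp
          have hc1 : ¬(s = beg ∨ s = e ∨ s ∉ bs ++ br) := by
            push Not
            exact ⟨by omega, hlast, List.mem_append.2 (Or.inl hbs)⟩
          have hc2 : ¬(s ≠ beg ∧ s ≠ e ∧ s ∈ br) := by tauto
          have hstepA : pvStepA beg e bs br (arcs, PySem.List.pyRange start s 1) s
              = ((if start < s then arcs ++ [PySem.List.pyRange start s 1] else arcs),
                 PySem.List.pyRange (s + 1) (s + 1) 1) := by
            simp only [pvStepA]
            rw [if_neg hc1, if_neg hc2, PySem.List.pyRange_one_eq_nil (le_refl (s + 1))]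
            by_cases hlt : start < s
            · rw [if_pos (hemp.2 hlt), if_pos hlt]
            · rw [if_neg (by simpa [hemp] using hlt), if_neg hlt]
          have hstepB : pvStepB brset (arcs, start) s
              = ((if start < s then arcs ++ [PySem.List.pyRange start s 1] else arcs), s + 1) := by
            simp only [pvStepB]
            rw [if_neg (fun h => hbr ((hbrset s).1 h))]
          rw [hstepA, hstepB]
          exact ih (s + 1) (s + 1) t _ (by omega) (by omega) (by omega) (by omega) hpt
            (by intro k; rw [hmt k]; tauto)
    · -- not a cut point (or an endpoint): A just extends the arc; qs is unchanged
      have hstepA : pvStepA beg e bs br (arcs, PySem.List.pyRange start s 1) s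
          = (arcs, PySem.List.pyRange start (s + 1) 1) := by
        simp only [pvStepA]
        rw [if_pos (Or.inr (Or.inr (by rw [List.mem_append]; tauto))),
          PySem.List.pyRange_one_succ_right h3]
      rw [hstepA]
      refine ih (s + 1) start qs arcs (by omega) (by omega) (by omega) (by omega) hp ?_
      intro k
      rw [hmem k]
      constructor
      · rintro ⟨ha, hb, hc, hd⟩
        refine ⟨ha, hb, hc, ?_⟩
        rcases eq_or_lt_of_le hd with h | h
        · exact absurd (h ▸ ha) hcut
        · omega
      · rintro ⟨ha, hb, hc, hd⟩
        exact ⟨ha, hb, hc, by omega⟩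

-- ===== VERDICT (by name: the statement is the Claim_ definition above) =====
theorem prepareArcsFromBreaks_spec : Claim_equal_prepareArcsFromBreaks := by
  intro coordinates breaks bridges _ hpre
  unfold Spec_prepareArcsFromBreaks
  simp only [prepareArcsFromBreaks, prepareArcsFromBreaks_alt]
  set bs := breaks.getD [] with hbs
  set brs := bridges.getD [] with hbrs
  set keys := coordinates.map Prod.fst with hkeys
  have hkne : keys ≠ [] := by simpa [hkeys] using hpre
  obtain ⟨beg, hmin⟩ : ∃ b, PySem.List.min? keys (fun x => x) = some b := by
    cases hmn : PySem.List.min? keys (fun x => x) with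
    | none => exact absurd ((PySem.List.min?_eq_none_iff keys (fun x => x)).1 hmn) hkne
    | some b => exact ⟨b, rfl⟩
  obtain ⟨e, hmax⟩ : ∃ b, PySem.List.max? keys (fun x => x) = some b := by
    cases hmx : PySem.List.max? keys (fun x => x) with
    | none => exact absurd ((PySem.List.max?_eq_none_iff keys (fun x => x)).1 hmx) hkne
    | some b => exact ⟨b, rfl⟩
  rw [hmin, hmax]
  have hbe : beg ≤ e := PySem.List.min?_isMin hmin _ (PySem.List.max?_mem hmax)
  set br := brs.flatMap (fun bridge => bridge) with hbr
  set brset := PySem.Set.ofList br with hbrset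
  set cutPoints := PySem.List.sorted ((PySem.Set.union brset bs).filter (fun k => decide (beg < k) && decide (k < e))) (fun x => x) false with hcp
  have hmemcp : ∀ k, k ∈ cutPoints ↔ (k ∈ bs ∨ k ∈ br) ∧ beg < k ∧ k < e ∧ beg + 1 ≤ k := by
    intro k
    rw [hcp, PySem.List.mem_sorted, List.mem_filter]
    simp only [PySem.Set.mem_union, hbrset, PySem.Set.mem_ofList, Bool.and_eq_true, decide_eq_true_eq]
    constructor
    · rintro ⟨h1, h2, h3⟩
      exact ⟨h1.symm, h2, h3, by omega⟩
    · rintro ⟨h1, h2, h3, -⟩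
      exact ⟨h1.symm, h2, h3⟩
  have hndcp : cutPoints.Pairwise (· < ·) := by
    have hnd : ((PySem.Set.union brset bs).filter (fun k => decide (beg < k) && decide (k < e))).Nodup :=
      List.Nodup.filter _ (PySem.Set.nodup_union brset bs (show brset.Nodup by rw [hbrset]; exact PySem.Set.nodup_ofList br))
    have hperm := PySem.List.sorted_perm ((PySem.Set.union brset bs).filter (fun k => decide (beg < k) && decide (k < e))) (fun x => x) false
    have hnd2 : cutPoints.Nodup := hperm.nodup_iff.2 hnd
    have hle : cutPoints.Pairwise (fun a b => a ≤ b) :=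
      PySem.List.sorted_pairwise ((PySem.Set.union brset bs).filter (fun k => decide (beg < k) && decide (k < e))) (fun x => x)
    exact (hle.and hnd2).imp (fun h => lt_of_le_of_ne h.1 h.2)
  have hstep0 : pvStepA beg e bs br (([] : List (List Int)), ([] : List Int)) beg
      = ([], PySem.List.pyRange beg (beg + 1) 1) := by
    simp [pvStepA, PySem.List.pyRange_one_singleton]
  have hcarve := pv_carve bs br brset beg e (by intro k; simp [hbrset, PySem.Set.mem_ofList])
    (e + 1 - (beg + 1)).toNat (beg + 1) beg cutPoints [] (by omega) (by omega) (by omega) rfl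
    hndcp hmemcp
  have main : ((PySem.List.pyRange beg (e + 1) 1).foldl (pvStepA beg e bs br) ([], [])).1 ++
        [((PySem.List.pyRange beg (e + 1) 1).foldl (pvStepA beg e bs br) ([], [])).2] ++
        brs.map (fun bridge => bridge) =
      (cutPoints.foldl (pvStepB brset) ([], beg)).1 ++
        [PySem.List.pyRange ((cutPoints.foldl (pvStepB brset) ([], beg)).2) (e + 1) 1] ++
        brs.map (fun bridge => bridge) := by
    rw [PySem.List.pyRange_one_cons (by omega : beg < e + 1)]
    simp only [List.foldl_cons]
    rw [hstep0]
    exact congrArg (fun l => l ++ brs.map (fun bridge => bridge)) hcarve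
  exact main
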